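-- pv_equiv track=rewrite | github.com/manerao-pritam/Solutions-for-Programming-Street-150 | PS-Sprint-2/41.increasing_num_pattern.py | generate_patter
-- ===== SOURCE A (Python) =====
-- def generate_patter(rows):
--     result = []
--     for r in range(rows):
--         count = 1
--         row = []
--         for c in range(r + 1):
--             row.append(count)
--             count += 1
--         result.append(row)
--
--     return result
-- ===== SOURCE B (Python) =====
-- def generate_patter(rows):
--     result = []
--     row = []
--     for r in range(rows):
--         row = row + [r + 1]
--         result.append(row)
--     return result
-- ===== Notes on version B (the rewrite author's own statement) =====
-- stated objective: alternative
-- what changed: B builds each row incrementally from the previous row (row = row + [r+1]), eliminating A's inner counting loop that rebuilds every row from scratch.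
import Mathlib
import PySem

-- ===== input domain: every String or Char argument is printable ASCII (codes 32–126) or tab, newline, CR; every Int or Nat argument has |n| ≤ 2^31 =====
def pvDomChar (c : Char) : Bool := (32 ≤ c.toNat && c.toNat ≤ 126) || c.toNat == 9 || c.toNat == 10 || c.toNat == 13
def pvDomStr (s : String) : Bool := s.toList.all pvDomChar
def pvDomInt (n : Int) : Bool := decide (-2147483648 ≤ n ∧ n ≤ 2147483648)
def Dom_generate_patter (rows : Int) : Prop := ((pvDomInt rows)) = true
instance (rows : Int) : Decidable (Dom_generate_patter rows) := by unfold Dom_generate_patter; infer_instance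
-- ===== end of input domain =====

-- B builds each row from the previous one instead of A's inner counting loop; return values proved equal for all rows.

-- ===== PORT A =====
-- for r in range(rows): count = 1; row = []; for c in range(r+1): row.append(count); count += 1; result.append(row)
def generate_patter (rows : Int) : List (List Int) :=
  (PySem.List.pyRange 0 rows 1).foldl
    (fun result r =>
      let inner := (PySem.List.pyRange 0 (r + 1) 1).foldl
        (fun (p : Int × List Int) _c => (p.1 + 1, p.2 ++ [p.1])) (1, [])
      result ++ [inner.2])
    []

-- ===== PORT B =====
-- row starts []; for r in range(rows): row = row + [r+1]; result.append(row)
def generate_patter_alt (rows : Int) : List (List Int) :=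
  ((PySem.List.pyRange 0 rows 1).foldl
    (fun (p : List (List Int) × List Int) r =>
      let row := p.2 ++ [r + 1]
      (p.1 ++ [row], row))
    ([], [])).1

-- ===== PRECONDITION & SPEC =====
def Spec_generate_patter (rows : Int) (out : List (List Int)) : Prop := out = generate_patter_alt rows
instance (rows : Int) (out : List (List Int)) : Decidable (Spec_generate_patter rows out) := by unfold Spec_generate_patter; infer_instance

-- ===== CLAIM (what is proved, stated in full; the proofs are below) =====
def Claim_equal_generate_patter : Prop := ∀ (rows : Int), Dom_generate_patter rows → Spec_generate_patter rows (generate_patter rows)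

-- ===== LEMMAS AND PROOFS =====

-- the row prefix [1, 2, …, n]
def pvPrefix (n : Nat) : List Int := (List.range n).map (fun i : Nat => (1 : Int) + (i : Int))

-- the full triangle with n rows
def pvTri (n : Nat) : List (List Int) := (List.range n).map (fun r => pvPrefix (r + 1))

lemma pvPrefix_succ (n : Nat) : pvPrefix (n + 1) = pvPrefix n ++ [(n : Int) + 1] := by
  simp [pvPrefix, List.range_succ, add_comm]

lemma pvTri_succ (n : Nat) : pvTri (n + 1) = pvTri n ++ [pvPrefix (n + 1)] := by
  simp [pvTri, List.range_succ]

-- A's inner loop: counting append from (c, l)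
lemma innerA (L : List Int) : ∀ (c : Int) (l : List Int),
    L.foldl (fun (p : Int × List Int) _c => (p.1 + 1, p.2 ++ [p.1])) (c, l)
      = (c + L.length, l ++ (List.range L.length).map (fun i : Nat => c + (i : Int))) := by
  induction L with
  | nil => simp
  | cons x xs ih =>
      intro c l
      simp only [List.foldl_cons, ih, List.length_cons]
      refine Prod.ext ?_ ?_
      · simp; ring
      · simp only [List.range_succ_eq_map, List.map_map, List.append_assoc, List.cons_append,
          List.map_cons, Nat.cast_zero, add_zero]
        simp only [List.nil_append]
        congr 1
        congr 1
        apply List.map_congr_left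
        intro i _; simp [Function.comp]; ring

-- A computes the triangle
lemma A_eq (n : Nat) : generate_patter n = pvTri n := by
  induction n with
  | zero => simp [generate_patter, pvTri, PySem.List.pyRange_one_eq_nil]
  | succ n ih =>
      have h : PySem.List.pyRange 0 ((n : Int) + 1) 1
          = PySem.List.pyRange 0 (n : Int) 1 ++ [(n : Int)] :=
        PySem.List.pyRange_one_succ_right (by positivity)
      have hcast : ((n : Int) + 1 : Int) = ((n + 1 : Nat) : Int) := by push_cast; ring
      rw [pvTri_succ, ← ih]
      simp only [generate_patter]
      rw [← hcast, h, List.foldl_append]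
      simp only [List.foldl_cons, List.foldl_nil]
      congr 1
      have := innerA (PySem.List.pyRange 0 ((n : Int) + 1) 1) 1 []
      rw [this]
      simp [PySem.List.length_pyRange_one, pvPrefix]

-- B's invariant: the fold carries (triangle so far, current prefix)
lemma B_inv (n : Nat) :
    (PySem.List.pyRange 0 (n : Int) 1).foldl
      (fun (p : List (List Int) × List Int) r =>
        let row := p.2 ++ [r + 1]
        (p.1 ++ [row], row))
      ([], [])
    = (pvTri n, pvPrefix n) := by
  induction n with
  | zero => simp [pvTri, pvPrefix, PySem.List.pyRange_one_eq_nil]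
  | succ n ih =>
      have hcast : (((n + 1 : Nat)) : Int) = (n : Int) + 1 := by push_cast; ring
      have h : PySem.List.pyRange 0 ((n : Int) + 1) 1
          = PySem.List.pyRange 0 (n : Int) 1 ++ [(n : Int)] :=
        PySem.List.pyRange_one_succ_right (by positivity)
      rw [hcast, h, List.foldl_append, ih]
      simp only [List.foldl_cons, List.foldl_nil]
      rw [← pvPrefix_succ, ← pvTri_succ]

lemma B_eq (n : Nat) : generate_patter_alt n = pvTri n := by
  simp [generate_patter_alt, B_inv n]

-- ===== VERDICT (by name: the statement is the Claim_ definition above) =====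
theorem generate_patter_spec : Claim_equal_generate_patter := by
  intro rows _
  unfold Spec_generate_patter
  rcases le_or_gt 0 rows with h | h
  · have : rows = (rows.toNat : Int) := (Int.toNat_of_nonneg h).symm
    rw [this, A_eq, B_eq]
  · have hnil : PySem.List.pyRange 0 rows 1 = [] :=
      PySem.List.pyRange_one_eq_nil (by omega)
    simp [generate_patter, generate_patter_alt, hnil]
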